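-- pv_equiv track=rewrite | github.com/AmedeoPelliccia/AEROSPACEMODEL-ASIT | src/aerospacemodel/topology/mesh.py | _bfs_shortest
-- ===== SOURCE A (Python) =====
-- from collections import deque
-- from typing import (
--     Any,
--     Dict,
--     List,
--     Optional,
--     Set,
--     Tuple,
-- )
--
-- def _bfs_shortest(
--     adj: Dict[str, List[str]],
--     source: str,
--     target: str,
--     excluded: Set[str],
-- ) -> Optional[List[str]]:
--     """BFS shortest path on *adj* skipping *excluded* nodes.
--
--     Returns:
--         Path as list of node IDs, or None if unreachable.
--     """
--     if source == target:
--         return [source]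
--     parent: Dict[str, Optional[str]] = {source: None}
--     queue: deque[str] = deque([source])
--     while queue:
--         current = queue.popleft()
--         for neighbor in adj.get(current, []):
--             if neighbor in parent or neighbor in excluded:
--                 continue
--             parent[neighbor] = current
--             if neighbor == target:
--                 path: List[str] = []
--                 node: Optional[str] = target
--                 while node is not None:
--                     path.append(node)
--                     node = parent[node]
--                 path.reverse()
--                 return path
--             queue.append(neighbor)
--     return None
-- ===== SOURCE B (Python) =====
-- def _bfs_shortest(adj, source, target, excluded):
--     """BFS shortest path on *adj* skipping *excluded* nodes.
--
--     Level-synchronous frontier of (node, full-path) pairs: no parent map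
--     and no backward reconstruction; the answer path is carried forward."""
--     if source == target:
--         return [source]
--     visited = {source}
--     frontier = [(source, [source])]
--     while frontier:
--         next_frontier = []
--         for node, path in frontier:
--             for nb in adj.get(node, []):
--                 if nb in visited or nb in excluded:
--                     continue
--                 visited.add(nb)
--                 if nb == target:
--                     return path + [nb]
--                 next_frontier.append((nb, path + [nb]))
--         frontier = next_frontier
--     return None
-- ===== Notes on version B (the rewrite author's own statement) =====
-- stated objective: alternative
-- what changed: B replaces A's FIFO-queue BFS with a parent-pointer dict and backward path reconstruction by a level-synchronous BFS whose frontier carries (node, full path) pairs and a plain visited set: there is no parent map and no reconstruction walk, the answer path is built forward and returned the moment the target is discovered.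
import Mathlib
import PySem

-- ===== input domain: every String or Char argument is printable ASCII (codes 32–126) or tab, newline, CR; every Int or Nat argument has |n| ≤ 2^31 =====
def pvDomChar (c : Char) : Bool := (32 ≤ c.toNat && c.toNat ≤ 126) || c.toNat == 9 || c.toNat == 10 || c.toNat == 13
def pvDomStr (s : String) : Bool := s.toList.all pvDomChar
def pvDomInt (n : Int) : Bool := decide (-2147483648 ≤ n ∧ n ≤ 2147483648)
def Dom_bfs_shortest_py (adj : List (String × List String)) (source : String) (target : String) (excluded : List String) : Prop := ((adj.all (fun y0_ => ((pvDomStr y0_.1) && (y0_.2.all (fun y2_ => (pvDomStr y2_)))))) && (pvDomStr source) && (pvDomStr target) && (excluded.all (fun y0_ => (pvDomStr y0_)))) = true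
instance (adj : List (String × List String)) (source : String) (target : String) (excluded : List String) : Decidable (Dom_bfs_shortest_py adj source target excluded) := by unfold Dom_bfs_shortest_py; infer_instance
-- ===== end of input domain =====

-- B is a level-synchronous BFS whose frontier carries (node, full path) pairs and a visited
-- set, instead of A's FIFO-queue BFS with a parent map and backward reconstruction
-- (objective: alternative data structure, same answers).

-- ===== shared helpers (both Pythons contain the identical statements these port) =====

-- adj.get(current, []) on the association-list dict (first match)
def pvGetAdj (adj : List (String × List String)) (k : String) : List String :=
  match adj.find? (fun kv => kv.1 == k) with
  | some kv => kv.2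
  | none => []

-- every string that can ever be newly visited during the BFS
def pvVals (adj : List (String × List String)) : List String :=
  adj.flatMap (fun kv => kv.2)

lemma pvGetAdj_subset (adj : List (String × List String)) (k n : String)
    (hn : n ∈ pvGetAdj adj k) : n ∈ pvVals adj := by
  unfold pvGetAdj at hn
  unfold pvVals
  cases hfind : adj.find? (fun kv => kv.1 == k) with
  | none => rw [hfind] at hn; simp at hn
  | some kv =>
    rw [hfind] at hn
    exact List.mem_flatMap.2 ⟨kv, List.mem_of_find?_eq_some hfind, hn⟩

lemma pvCountP_lt {α : Type} (p q : α → Bool) (hpq : ∀ x, q x = true → p x = true) :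
    ∀ (S : List α) (n : α), n ∈ S → p n = true → q n = false → S.countP q < S.countP p := by
  intro S
  induction S with
  | nil => intro n hn; simp at hn
  | cons a S ih =>
    intro n hn hp hq
    rcases List.mem_cons.1 hn with rfl | hmem
    · have hle : S.countP q ≤ S.countP p := List.countP_mono_left (fun x _ => hpq x)
      simp [List.countP_cons, hp, hq]; omega
    · have hlt := ih n hmem hp hq
      by_cases hqa : q a = true
      · simp [List.countP_cons, hqa, hpq a hqa]; omega
      · simp at hqa
        simp [List.countP_cons, hqa]
        by_cases hpa : p a = true <;> simp [hpa] <;> omega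

-- ===== PORT A =====

-- number of potential keys not yet in `parent` (termination measure component)
def pvCnt (S : List String) (p : PySem.Dict String (Option String)) : Nat :=
  S.countP (fun x => ! p.contains x)

lemma pvCnt_insert_lt (S : List String) (parent : PySem.Dict String (Option String))
    (n : String) (v : Option String) (hS : n ∈ S) (h : parent.contains n = false) :
    pvCnt S (parent.insert n v) < pvCnt S parent := by
  unfold pvCnt
  refine pvCountP_lt _ _ ?_ S n hS ?_ ?_
  · intro x hx
    simp only [PySem.Dict.contains_insert, Bool.not_eq_eq_eq_not, Bool.not_true, Bool.or_eq_false_iff] at hx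
    simp [hx.2]
  · simp [h]
  · simp [PySem.Dict.contains_insert]

-- A's path reconstruction: 'while node is not None: path.append(node); node = parent[node]'
-- then reverse, computed source-first directly over the parent map's entry list. The parent-pointer
-- lookup is restricted to the entries BEFORE the node's own entry: exact for the parent maps A's
-- loop builds (keys unique, every parent value names an earlier-inserted key or is None).
def pvWalk (entries : List (String × Option String)) (node : String) : List String :=
  match hf : entries.findIdx? (fun e => e.1 == node) with
  | none => [node]
  | some i =>
    match entries[i]? with
    | none => [node]
    | some (_, none) => [node]
    | some (_, some m) => pvWalk (entries.take i) m ++ [node]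
termination_by entries.length
decreasing_by
  have hi : i < entries.length := (List.findIdx?_eq_some_iff_findIdx_eq.1 hf).1
  simp [List.length_take]; omega

-- A's neighbour scan: early-exits with the reconstructed path when the target is discovered
def pvScanA (target current : String) (excluded : List String) :
    PySem.Dict String (Option String) → List String → List String →
    (PySem.Dict String (Option String) × List String) ⊕ List String
  | parent, queue, [] => .inl (parent, queue)
  | parent, queue, n :: ns =>
    if parent.contains n || excluded.contains n then
      pvScanA target current excluded parent queue ns
    else
      let parent' := parent.insert n (some current)
      if n = target then .inr (pvWalk parent'.items target)
      else pvScanA target current excluded parent' (queue ++ [n]) ns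

lemma pvScanA_measure (S : List String) (t c : String) (ex : List String) :
    ∀ (ns : List String) (parent : PySem.Dict String (Option String)) (queue : List String)
      (p' : PySem.Dict String (Option String)) (q' : List String),
      (∀ n ∈ ns, n ∈ S) → pvScanA t c ex parent queue ns = .inl (p', q') →
      pvCnt S p' + q'.length ≤ pvCnt S parent + queue.length := by
  intro ns
  induction ns with
  | nil => intro parent queue p' q' _ h; simp [pvScanA] at h; simp [h.1, h.2]
  | cons n ns ih =>
    intro parent queue p' q' hsub h
    simp only [pvScanA] at h
    by_cases hc : (parent.contains n || ex.contains n) = true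
    · rw [if_pos hc] at h
      exact ih parent queue p' q' (fun m hm => hsub m (List.mem_cons_of_mem n hm)) h
    · rw [if_neg hc] at h
      simp only [Bool.or_eq_true, not_or] at hc
      by_cases ht : n = t
      · simp [ht] at h
      · rw [if_neg ht] at h
        have h1 := ih (parent.insert n (some c)) (queue ++ [n]) p' q'
          (fun m hm => hsub m (List.mem_cons_of_mem n hm)) h
        have h2 := pvCnt_insert_lt S parent n (some c) (hsub n (List.mem_cons_self))
          (Bool.not_eq_true _ ▸ (by simpa using hc.1))
        simp [List.length_append] at h1 ⊢
        omega

def pvLoopA (adj : List (String × List String)) (target : String) (excluded : List String)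
    (parent : PySem.Dict String (Option String)) (queue : List String) : Option (List String) :=
  match queue with
  | [] => none
  | current :: rest =>
    match h : pvScanA target current excluded parent rest (pvGetAdj adj current) with
    | .inl pq => pvLoopA adj target excluded pq.1 pq.2
    | .inr path => some path
termination_by pvCnt (pvVals adj) parent + queue.length
decreasing_by
  have := pvScanA_measure (pvVals adj) target current excluded (pvGetAdj adj current)
    parent rest pq.1 pq.2 (fun n hn => pvGetAdj_subset adj current n hn) h
  simp only [List.length_cons]; omega

def bfs_shortest_py (adj : List (String × List String)) (source : String) (target : String)
    (excluded : List String) : Option (List String) :=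
  if source = target then some [source]
  else pvLoopA adj target excluded (PySem.Dict.ofList [(source, none)]) [source]

-- ===== PORT B =====

-- unvisited-count measure for B's visited set
def pvCntS (S : List String) (v : PySem.Set String) : Nat :=
  S.countP (fun x => ! v.contains x)

lemma pvSetContains_add (v : PySem.Set String) (n x : String) :
    (v.add n).contains x = (v.contains x || x == n) := by
  by_cases hn : n ∈ v
  · rw [PySem.Set.add_of_mem hn]
    by_cases hx : x = n
    · subst hx; simp [hn]
    · simp [hx]
  · rw [PySem.Set.add_of_not_mem hn]
    by_cases hx : x = n <;> simp [hx]

lemma pvCntS_add_lt (S : List String) (v : PySem.Set String) (n : String)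
    (hS : n ∈ S) (h : v.contains n = false) :
    pvCntS S (v.add n) < pvCntS S v := by
  unfold pvCntS
  refine pvCountP_lt _ _ ?_ S n hS ?_ ?_
  · intro x hx
    have hx' : (v.add n).contains x = false := by
      rw [Bool.not_eq_eq_eq_not, Bool.not_true] at hx; exact hx
    rw [pvSetContains_add, Bool.or_eq_false_iff] at hx'
    rw [Bool.not_eq_eq_eq_not, Bool.not_true]; exact hx'.1
  · rw [Bool.not_eq_eq_eq_not, Bool.not_true]; exact h
  · rw [Bool.not_eq_eq_eq_not, Bool.not_false, pvSetContains_add]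
    simp

-- B's per-node neighbour scan: extends the visited set and the next frontier,
-- or early-returns the forward-built path when the target is discovered
def pvScanB (target : String) (excluded : List String) (p : List String) :
    PySem.Set String → List (String × List String) → List String →
    (PySem.Set String × List (String × List String)) ⊕ List String
  | visited, nx, [] => .inl (visited, nx)
  | visited, nx, n :: ns =>
    if visited.contains n || excluded.contains n then
      pvScanB target excluded p visited nx ns
    else
      let visited' := visited.add n
      if n = target then .inr (p ++ [n])
      else pvScanB target excluded p visited' (nx ++ [(n, p ++ [n])]) ns

lemma pvScanB_measure (S : List String) (t : String) (ex : List String) (p : List String) :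
    ∀ (ns : List String) (visited : PySem.Set String) (nx : List (String × List String))
      (v' : PySem.Set String) (nx' : List (String × List String)),
      (∀ n ∈ ns, n ∈ S) → pvScanB t ex p visited nx ns = .inl (v', nx') →
      pvCntS S v' + nx'.length ≤ pvCntS S visited + nx.length := by
  intro ns
  induction ns with
  | nil => intro visited nx v' nx' _ h; simp [pvScanB] at h; simp [h.1, h.2]
  | cons n ns ih =>
    intro visited nx v' nx' hsub h
    simp only [pvScanB] at h
    by_cases hc : (visited.contains n || ex.contains n) = true
    · rw [if_pos hc] at h
      exact ih visited nx v' nx' (fun m hm => hsub m (List.mem_cons_of_mem n hm)) h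
    · rw [if_neg hc] at h
      simp only [Bool.or_eq_true, not_or] at hc
      by_cases ht : n = t
      · simp [ht] at h
      · rw [if_neg ht] at h
        have h1 := ih (visited.add n) (nx ++ [(n, p ++ [n])]) v' nx'
          (fun m hm => hsub m (List.mem_cons_of_mem n hm)) h
        have h2 := pvCntS_add_lt S visited n (hsub n (List.mem_cons_self))
          (Bool.not_eq_true _ ▸ (by simpa using hc.1))
        simp [List.length_append] at h1 ⊢
        omega

-- B's inner 'for node, path in frontier' loop, accumulating the next frontier
def pvRound (adj : List (String × List String)) (target : String) (excluded : List String) :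
    PySem.Set String → List (String × List String) → List (String × List String) →
    (PySem.Set String × List (String × List String)) ⊕ List String
  | visited, nx, [] => .inl (visited, nx)
  | visited, nx, (n, p) :: fs =>
    match pvScanB target excluded p visited nx (pvGetAdj adj n) with
    | .inr q => .inr q
    | .inl vn => pvRound adj target excluded vn.1 vn.2 fs

lemma pvRound_measure (adj : List (String × List String)) (t : String) (ex : List String) :
    ∀ (fs : List (String × List String)) (visited : PySem.Set String)
      (nx : List (String × List String)) (v' : PySem.Set String)
      (nx' : List (String × List String)),
      pvRound adj t ex visited nx fs = .inl (v', nx') →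
      pvCntS (pvVals adj) v' + nx'.length ≤ pvCntS (pvVals adj) visited + nx.length := by
  intro fs
  induction fs with
  | nil => intro visited nx v' nx' h; simp [pvRound] at h; simp [h.1, h.2]
  | cons e fs ih =>
    intro visited nx v' nx' h
    obtain ⟨n, p⟩ := e
    simp only [pvRound] at h
    cases hs : pvScanB t ex p visited nx (pvGetAdj adj n) with
    | inr q => rw [hs] at h; simp at h
    | inl vn =>
      rw [hs] at h
      have h1 := pvScanB_measure (pvVals adj) t ex p (pvGetAdj adj n) visited nx vn.1 vn.2
        (fun m hm => pvGetAdj_subset adj n m hm) (by rw [hs])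
      have h2 := ih vn.1 vn.2 v' nx' h
      omega

-- B's outer 'while frontier' loop
def pvLoopB (adj : List (String × List String)) (target : String) (excluded : List String)
    (visited : PySem.Set String) (frontier : List (String × List String)) :
    Option (List String) :=
  match frontier with
  | [] => none
  | e :: fs =>
    match h : pvRound adj target excluded visited [] (e :: fs) with
    | .inr q => some q
    | .inl vn => pvLoopB adj target excluded vn.1 vn.2
termination_by 2 * pvCntS (pvVals adj) visited + frontier.length
decreasing_by
  have := pvRound_measure adj target excluded (e :: fs) visited [] vn.1 vn.2 h
  simp only [List.length_nil, List.length_cons] at this ⊢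
  omega

def bfs_shortest_py_alt (adj : List (String × List String)) (source : String) (target : String)
    (excluded : List String) : Option (List String) :=
  if source = target then some [source]
  else pvLoopB adj target excluded (PySem.Set.ofList [source]) [(source, [source])]

-- ===== PRECONDITION & SPEC =====
def Spec_bfs_shortest_py (adj : List (String × List String)) (source : String) (target : String) (excluded : List String) (out : Option (List String)) : Prop := out = bfs_shortest_py_alt adj source target excluded
instance (adj : List (String × List String)) (source : String) (target : String) (excluded : List String) (out : Option (List String)) : Decidable (Spec_bfs_shortest_py adj source target excluded out) := by unfold Spec_bfs_shortest_py; infer_instance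

-- ===== CLAIM (what is proved, stated in full; the proofs are below) =====
def Claim_equal_bfs_shortest_py : Prop := ∀ (adj : List (String × List String)) (source : String) (target : String) (excluded : List String), Dom_bfs_shortest_py adj source target excluded → Spec_bfs_shortest_py adj source target excluded (bfs_shortest_py adj source target excluded)

-- ===== LEMMAS AND PROOFS =====

-- findIdx? is stable under appending entries on the right once it already hits
lemma pvFindIdx?_append_some {α : Type} (p : α → Bool) (l l2 : List α) (i : Nat)
    (h : l.findIdx? p = some i) : (l ++ l2).findIdx? p = some i := by
  rw [List.findIdx?_eq_some_iff_findIdx_eq] at h ⊢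
  obtain ⟨hi, hfi⟩ := h
  refine ⟨by simp; omega, ?_⟩
  rw [List.findIdx_append, hfi, if_pos hi]

-- one-step characterisation of pvWalk when the node's entry index is known
lemma pvWalk_eq_of_findIdx (entries : List (String × Option String)) (node : String) (i : Nat)
    (hi : entries.findIdx? (fun e => e.1 == node) = some i) :
    pvWalk entries node =
      (match entries[i]? with
      | some (_, some m) => pvWalk (entries.take i) m ++ [node]
      | _ => [node]) := by
  rw [pvWalk]
  split
  · next heq => rw [heq] at hi; cases hi
  · next j heq =>
    rw [heq] at hi
    obtain rfl : j = i := by injection hi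
    split <;> rename_i h2 <;> rw [h2]

-- the reconstruction only reads entries up to the node's entry, so later appends don't matter
lemma pvWalk_append (entries ext : List (String × Option String)) (node : String)
    (h : (entries.findIdx? (fun e => e.1 == node)).isSome) :
    pvWalk (entries ++ ext) node = pvWalk entries node := by
  obtain ⟨i, hi⟩ := Option.isSome_iff_exists.1 h
  have hilt : i < entries.length := (List.findIdx?_eq_some_iff_findIdx_eq.1 hi).1
  have hi' : (entries ++ ext).findIdx? (fun e => e.1 == node) = some i :=
    pvFindIdx?_append_some _ entries ext i hi
  rw [pvWalk_eq_of_findIdx (entries ++ ext) node i hi', pvWalk_eq_of_findIdx entries node i hi]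
  rw [List.getElem?_append_left hilt]
  rw [List.take_append_of_le_length (le_of_lt hilt)]

lemma pvContains_iff_findIdx? (d : PySem.Dict String (Option String)) (k : String) :
    d.contains k = (d.items.findIdx? (fun e => e.1 == k)).isSome := by
  rw [List.findIdx?_isSome]; rfl

-- unfolding pvLoopB at a non-empty frontier, with the dependent match replaced by a plain one
lemma pvLoopB_cons (adj : List (String × List String)) (t : String) (ex : List String)
    (visited : PySem.Set String) (e : String × List String) (fs : List (String × List String)) :
    pvLoopB adj t ex visited (e :: fs)
      = (match pvRound adj t ex visited [] (e :: fs) with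
         | .inr q => some q
         | .inl vn => pvLoopB adj t ex vn.1 vn.2) := by
  rw [pvLoopB]
  split
  · next q heq => rw [heq]
  · next vn heq => rw [heq]

-- inserting a fresh key n with parent c makes pvWalk at n the walk to c plus n
lemma pvWalk_insert_fresh (parent : PySem.Dict String (Option String)) (n c : String)
    (h : parent.contains n = false) :
    pvWalk (parent.insert n (some c)).items n = pvWalk parent.items c ++ [n] := by
  have hitems : (parent.insert n (some c)).items = parent.items ++ [(n, some c)] :=
    PySem.Dict.items_insert_of_not_contains parent (some c) h
  have hnone : parent.items.findIdx? (fun e => e.1 == n) = none := by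
    have := pvContains_iff_findIdx? parent n
    rw [h] at this
    cases hx : parent.items.findIdx? (fun e => e.1 == n) with
    | none => rfl
    | some j => rw [hx] at this; simp at this
  have hf : (parent.items ++ [(n, some c)]).findIdx? (fun e => e.1 == n)
      = some parent.items.length := by
    rw [List.findIdx?_append, hnone]
    simp
  rw [hitems, pvWalk_eq_of_findIdx _ n parent.items.length hf]
  rw [List.getElem?_append_right (le_refl _)]
  simp

-- mere containment is preserved by insert
lemma pvContains_insert_mono (parent : PySem.Dict String (Option String)) (n m : String)
    (v : Option String) (h : parent.contains m = true) :
    (parent.insert n v).contains m = true := by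
  rw [PySem.Dict.contains_insert, h, Bool.or_true]

-- pvWalk at an already-present key is unchanged by inserting a fresh key
lemma pvWalk_insert_fresh_old (parent : PySem.Dict String (Option String)) (n m : String)
    (v : Option String) (hn : parent.contains n = false) (hm : parent.contains m = true) :
    pvWalk (parent.insert n v).items m = pvWalk parent.items m := by
  rw [PySem.Dict.items_insert_of_not_contains parent v hn]
  apply pvWalk_append
  rw [← pvContains_iff_findIdx?]; exact hm

-- ===== the scan lockstep: A's neighbour scan vs B's, related by the path invariant =====
lemma pvScanLock (t cur : String) (ex : List String) (p : List String) :
    ∀ (ns : List String) (parent : PySem.Dict String (Option String))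
      (visited : PySem.Set String) (Qpre : List String) (nx : List (String × List String)),
      (∀ x, visited.contains x = parent.contains x) →
      parent.contains t = false →
      parent.contains cur = true →
      pvWalk parent.items cur = p →
      (∀ e ∈ nx, parent.contains e.1 = true ∧ pvWalk parent.items e.1 = e.2) →
      ((∃ parent' visited' nx',
          pvScanA t cur ex parent (Qpre ++ nx.map Prod.fst) ns
            = .inl (parent', Qpre ++ nx'.map Prod.fst) ∧
          pvScanB t ex p visited nx ns = .inl (visited', nx') ∧
          (∀ x, visited'.contains x = parent'.contains x) ∧
          parent'.contains t = false ∧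
          (∀ m, parent.contains m = true →
            parent'.contains m = true ∧ pvWalk parent'.items m = pvWalk parent.items m) ∧
          (∀ e ∈ nx', parent'.contains e.1 = true ∧ pvWalk parent'.items e.1 = e.2))
        ∨ (∃ q, pvScanA t cur ex parent (Qpre ++ nx.map Prod.fst) ns = .inr q ∧
            pvScanB t ex p visited nx ns = .inr q)) := by
  intro ns
  induction ns with
  | nil =>
    intro parent visited Qpre nx hv ht hcc hcw hnx
    exact .inl ⟨parent, visited, nx, by simp [pvScanA], by simp [pvScanB], hv, ht,
      fun m hm => ⟨hm, rfl⟩, hnx⟩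
  | cons n ns ih =>
    intro parent visited Qpre nx hv ht hcc hcw hnx
    simp only [pvScanA, pvScanB]
    by_cases hc : (parent.contains n || ex.contains n) = true
    · have hcB : (visited.contains n || ex.contains n) = true := by rw [hv]; exact hc
      rw [if_pos hc, if_pos hcB]
      exact ih parent visited Qpre nx hv ht hcc hcw hnx
    · have hcB : ¬ (visited.contains n || ex.contains n) = true := by rw [hv]; exact hc
      rw [if_neg hc, if_neg hcB]
      simp only [Bool.or_eq_true, not_or] at hc
      have hfresh : parent.contains n = false := by simpa using hc.1
      by_cases hnt : n = t
      · rw [if_pos hnt, if_pos hnt]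
        have hw : pvWalk (parent.insert n (some cur)).items t = p ++ [n] := by
          subst hnt; rw [pvWalk_insert_fresh parent n cur hfresh, hcw]
        exact .inr ⟨p ++ [n], by simp [hw], rfl⟩
      · rw [if_neg hnt, if_neg hnt]
        have hv' : ∀ x, (visited.add n).contains x = (parent.insert n (some cur)).contains x := by
          intro x
          rw [pvSetContains_add, PySem.Dict.contains_insert, hv, Bool.or_comm]
        have ht' : (parent.insert n (some cur)).contains t = false := by
          rw [PySem.Dict.contains_insert, ht, Bool.or_false, beq_eq_false_iff_ne]
          exact fun hh => hnt hh.symm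
        have hcc' : (parent.insert n (some cur)).contains cur = true :=
          pvContains_insert_mono parent n cur _ hcc
        have hcw' : pvWalk (parent.insert n (some cur)).items cur = p := by
          rw [pvWalk_insert_fresh_old parent n cur _ hfresh hcc, hcw]
        have hnx' : ∀ e ∈ nx ++ [(n, p ++ [n])],
            (parent.insert n (some cur)).contains e.1 = true ∧
            pvWalk (parent.insert n (some cur)).items e.1 = e.2 := by
          intro e he
          rcases List.mem_append.1 he with he | he
          · obtain ⟨h1, h2⟩ := hnx e he
            exact ⟨pvContains_insert_mono parent n e.1 _ h1,
              by rw [pvWalk_insert_fresh_old parent n e.1 _ hfresh h1, h2]⟩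
          · simp only [List.mem_singleton] at he
            subst he
            refine ⟨by rw [PySem.Dict.contains_insert]; simp, ?_⟩
            simp only
            rw [pvWalk_insert_fresh parent n cur hfresh, hcw]
        have := ih (parent.insert n (some cur)) (visited.add n) Qpre (nx ++ [(n, p ++ [n])])
          hv' ht' hcc' hcw' hnx'
        have hq : Qpre ++ nx.map Prod.fst ++ [n] = Qpre ++ (nx ++ [(n, p ++ [n])]).map Prod.fst := by
          simp
        rcases this with ⟨parent', visited', nx', hA, hB, hv'', ht'', hpres, hnx''⟩ | ⟨q, hA, hB⟩
        · refine .inl ⟨parent', visited', nx', by rw [hq]; exact hA, hB, hv'', ht'', ?_, hnx''⟩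
          intro m hm
          obtain ⟨h1, h2⟩ := hpres m (pvContains_insert_mono parent n m _ hm)
          exact ⟨h1, by rw [h2, pvWalk_insert_fresh_old parent n m _ hfresh hm]⟩
        · exact .inr ⟨q, by rw [hq]; exact hA, hB⟩

-- ===== the loop lockstep, by induction on an explicit natural measure =====
lemma pvLoopLock (adj : List (String × List String)) (t : String) (ex : List String) :
    ∀ (N : Nat) (parent : PySem.Dict String (Option String)) (visited : PySem.Set String)
      (fr nx : List (String × List String)),
      2 * pvCnt (pvVals adj) parent + 2 * (fr.length + nx.length)
        + (if fr = [] then 1 else 0) ≤ N →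
      (∀ x, visited.contains x = parent.contains x) →
      parent.contains t = false →
      (∀ e ∈ fr ++ nx, parent.contains e.1 = true ∧ pvWalk parent.items e.1 = e.2) →
      pvLoopA adj t ex parent ((fr ++ nx).map Prod.fst) =
        (match pvRound adj t ex visited nx fr with
         | .inr q => some q
         | .inl vn => pvLoopB adj t ex vn.1 vn.2) := by
  intro N
  induction N with
  | zero =>
    intro parent visited fr nx hN
    exfalso
    cases fr <;> simp at hN
  | succ N ihN =>
    intro parent visited fr nx hN hv ht hinv
    match fr with
    | [] =>
      simp only [pvRound]
      match hnx : nx with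
      | [] => simp [pvLoopA, pvLoopB]
      | e :: nxs =>
        rw [pvLoopB_cons]
        have := ihN parent visited (e :: nxs) [] (by simp at hN ⊢; omega) hv ht
          (by simpa using hinv)
        simp only [List.append_nil] at this ⊢
        exact this
    | (n, p) :: fs =>
      have hinvh := hinv (n, p) (by simp)
      have hlock := pvScanLock t n ex p (pvGetAdj adj n) parent visited (fs.map Prod.fst) nx
        hv ht hinvh.1 hinvh.2 (fun e he => hinv e (by simp [he]))
      have hmap : ((n, p) :: fs ++ nx).map Prod.fst
          = n :: (fs.map Prod.fst ++ nx.map Prod.fst) := by simp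
      rw [hmap, pvLoopA]
      rcases hlock with ⟨parent', visited', nx', hA, hB, hv', ht', hpres, hnx'⟩ | ⟨q, hA, hB⟩
      · split
        · next pq heq =>
          rw [hA] at heq
          obtain rfl : pq = (parent', fs.map Prod.fst ++ nx'.map Prod.fst) := by
            injection heq with h; exact h.symm
          simp only [pvRound, hB]
          have hfs : ∀ e ∈ fs ++ nx', parent'.contains e.1 = true ∧
              pvWalk parent'.items e.1 = e.2 := by
            intro e he
            rcases List.mem_append.1 he with he | he
            · obtain ⟨h1, h2⟩ := hinv e (by simp [he])
              obtain ⟨h3, h4⟩ := hpres e.1 h1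
              exact ⟨h3, by rw [h4, h2]⟩
            · exact hnx' e he
          have hmeas := pvScanA_measure (pvVals adj) t n ex (pvGetAdj adj n) parent
            (fs.map Prod.fst ++ nx.map Prod.fst) parent' (fs.map Prod.fst ++ nx'.map Prod.fst)
            (fun m hm => pvGetAdj_subset adj n m hm) hA
          have := ihN parent' visited' fs nx'
            (by
              simp only [List.length_append, List.length_map, List.length_cons] at hmeas hN ⊢
              split <;> simp at hN <;> omega)
            hv' ht' hfs
          show pvLoopA adj t ex parent' (fs.map Prod.fst ++ nx'.map Prod.fst) = _
          rw [← List.map_append]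
          exact this
        · next q heq => rw [hA] at heq; cases heq
      · split
        · next pq heq => rw [hA] at heq; cases heq
        · next q' heq =>
          rw [hA] at heq
          obtain rfl : q = q' := by injection heq
          simp [pvRound, hB]

-- ===== VERDICT (by name: the statement is the Claim_ definition above) =====
theorem bfs_shortest_py_spec : Claim_equal_bfs_shortest_py := by
  intro adj source target excluded _
  unfold Spec_bfs_shortest_py bfs_shortest_py bfs_shortest_py_alt
  by_cases hst : source = target
  · simp [hst]
  · rw [if_neg hst, if_neg hst]
    have hparent : (PySem.Dict.ofList [(source, (none : Option String))])
        = PySem.Dict.empty.insert source none := rfl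
    have ht : (PySem.Dict.empty.insert source (none : Option String)).contains target = false := by
      rw [PySem.Dict.contains_insert]
      simp only [PySem.Dict.contains_empty, Bool.or_false, beq_eq_false_iff_ne]
      exact fun hh => hst hh.symm
    have hitems : (PySem.Dict.empty.insert source (none : Option String)).items
        = [(source, none)] := by
      rw [PySem.Dict.items_insert_of_not_contains _ _ (PySem.Dict.contains_empty source)]
      rfl
    have hwalk : pvWalk (PySem.Dict.empty.insert source (none : Option String)).items source
        = [source] := by
      rw [hitems, pvWalk_eq_of_findIdx [(source, none)] source 0 (by simp [List.findIdx?_cons])]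
      simp
    have hv : ∀ x, (PySem.Set.ofList [source]).contains x
        = (PySem.Dict.empty.insert source (none : Option String)).contains x := by
      intro x
      rw [PySem.Dict.contains_insert]
      by_cases hx : x = source <;> simp [hx, PySem.Set.ofList]
    have := pvLoopLock adj target excluded
      (2 * pvCnt (pvVals adj) (PySem.Dict.empty.insert source none) + 2)
      (PySem.Dict.empty.insert source none) (PySem.Set.ofList [source])
      [(source, [source])] []
      (by simp) hv ht
      (by
        intro e he
        simp only [List.append_nil, List.mem_singleton] at he
        subst he
        exact ⟨by rw [PySem.Dict.contains_insert]; simp, hwalk⟩)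
    rw [hparent]
    simp only [List.append_nil, List.map_cons, List.map_nil] at this
    rw [this, pvLoopB_cons]
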